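-- pv_equiv track=rewrite | github.com/sunfounder/4wd-car | examples/lab1_2_proto.py | refine_path
-- ===== SOURCE A (Python) =====
-- def get_direction_distance(start, end):
--     ew = end[0] - start[0]
--     ns = end[1] - start[1]
--     if ns and ew == 0:
--         return ('S', ns) if ns > 0 else ('N', ns)
--     elif ew and ns == 0:
--         return ('E', ew) if ew > 0 else ('W', ew)
--     else:
--         raise Exception(f"Unexpected start {start} and end {end}")
--
-- def refine_path(path, car_loc, car_direction):
--     ret = [car_loc]
--     start_loc = car_loc
--     cur_loc = car_loc
--     cur_direction = car_direction
--     for next_loc in path: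
--         direction, dist = get_direction_distance(cur_loc, next_loc)
--         if direction == cur_direction:
--             cur_loc = next_loc
--             next
--         else:
--             ret += [next_loc]
--             cur_direction = direction
--             cur_loc = next_loc
--             start_loc = next_loc
--     return ret
-- ===== SOURCE B (Python) =====
-- def get_direction_distance(start, end):
--     ew = end[0] - start[0]
--     ns = end[1] - start[1]
--     if ns and ew == 0:
--         return ('S', ns) if ns > 0 else ('N', ns)
--     elif ew and ns == 0:
--         return ('E', ew) if ew > 0 else ('W', ew)
--     else:
--         raise Exception(f"Unexpected start {start} and end {end}")
--
--
-- def _runs(pairs):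
--     """Split a list of (direction, endpoint) pairs into maximal runs of
--     equal direction (a hand-rolled groupby on the first component)."""
--     groups = []
--     i = 0
--     n = len(pairs)
--     while i < n:
--         d = pairs[i][0]
--         j = i + 1
--         while j < n and pairs[j][0] == d:
--             j += 1
--         groups.append(pairs[i:j])
--         i = j
--     return groups
--
--
-- def refine_path(path, car_loc, car_direction):
--     # stage 1: eager list of (direction, endpoint) pairs for every segment,
--     # with a synthetic leading pair (car_direction, car_loc) so that an initial
--     # run matching the car's heading is absorbed into the first group.
--     pairs = [(car_direction, car_loc)] + [
--         (get_direction_distance(s, e)[0], e)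
--         for s, e in zip([car_loc] + path, path)]
--     # stage 2: group into maximal runs of equal direction and keep the first
--     # endpoint of each group (the waypoint where that run starts).
--     return [g[0][1] for g in _runs(pairs)]
-- ===== Notes on version B (the rewrite author's own statement) =====
-- stated objective: alternative
-- what changed: B replaces A's stateful accumulator loop by a staged groupby: it eagerly builds the list of (direction, endpoint) pairs with a synthetic leading (car_direction, car_loc) pair, splits that list into maximal runs of equal direction, and returns each run's first endpoint.
import Mathlib
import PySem

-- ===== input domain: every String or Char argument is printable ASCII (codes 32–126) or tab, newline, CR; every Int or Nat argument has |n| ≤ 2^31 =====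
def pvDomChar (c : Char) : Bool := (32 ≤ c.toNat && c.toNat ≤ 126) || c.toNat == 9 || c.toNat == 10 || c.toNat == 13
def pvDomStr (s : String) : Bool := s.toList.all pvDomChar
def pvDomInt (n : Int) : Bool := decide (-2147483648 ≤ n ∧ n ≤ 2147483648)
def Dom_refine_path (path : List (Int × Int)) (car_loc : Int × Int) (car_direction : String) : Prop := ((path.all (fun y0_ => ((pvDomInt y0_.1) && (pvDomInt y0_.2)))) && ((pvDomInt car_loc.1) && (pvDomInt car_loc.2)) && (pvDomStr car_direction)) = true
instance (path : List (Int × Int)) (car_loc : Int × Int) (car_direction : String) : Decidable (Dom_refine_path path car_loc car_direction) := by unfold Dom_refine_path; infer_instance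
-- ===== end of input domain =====

-- B replaces A's stateful accumulator loop by a staged groupby: build all (direction, endpoint)
-- pairs with a synthetic leading pair, split into maximal equal-direction runs, keep each
-- run's first endpoint (objective: alternative; same O(n) cost).

-- ===== PORT A =====
-- get_direction_distance: `none` is exactly Python's `raise Exception(...)`.
def gdd (start fin : Int × Int) : Option (String × Int) :=
  let ew := fin.1 - start.1
  let ns := fin.2 - start.2
  if ns ≠ 0 ∧ ew = 0 then some (if ns > 0 then ("S", ns) else ("N", ns))
  else if ew ≠ 0 ∧ ns = 0 then some (if ew > 0 then ("E", ew) else ("W", ew))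
  else none

-- A's for-loop over `path` with state (ret, cur_loc, cur_direction); `none` = exception escaped.
-- (A's `start_loc` variable is written but never read, so it is not part of the state.)
def refineA_loop : List (Int × Int) → List (Int × Int) → (Int × Int) → String → Option (List (Int × Int))
  | [], ret, _, _ => some ret
  | next_loc :: rest, ret, cur_loc, cur_direction =>
    match gdd cur_loc next_loc with
    | none => none
    | some (direction, _dist) =>
      if direction == cur_direction then
        refineA_loop rest ret next_loc cur_direction
      else
        refineA_loop rest (ret ++ [next_loc]) next_loc direction

def refine_path (path : List (Int × Int)) (car_loc : Int × Int) (car_direction : String) : List (Int × Int) :=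
  (refineA_loop path [car_loc] car_loc car_direction).getD []

-- ===== PORT B =====
-- _runs: the outer while advances i to j = end of the current run; the inner while is the
-- takeWhile/dropWhile split of the suffix, so the loop is recursion on the remaining suffix.
def runsB : List (String × (Int × Int)) → List (List (String × (Int × Int)))
  | [] => []
  | (d, p) :: rest =>
    ((d, p) :: rest.takeWhile (fun x => x.1 == d)) :: runsB (rest.dropWhile (fun x => x.1 == d))
termination_by l => l.length
decreasing_by
  have := List.length_dropWhile_le (p := fun x : String × (Int × Int) => x.1 == d) (l := rest)
  simp only [List.length_cons]; omega

def refine_path_alt (path : List (Int × Int)) (car_loc : Int × Int) (car_direction : String) : List (Int × Int) :=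
  -- pairs = [(car_direction, car_loc)] + [(gdd(s,e)[0], e) for s,e in zip([car_loc]+path, path)]
  match (List.zip (car_loc :: path) path).mapM
      (fun se => (gdd se.1 se.2).map (fun dd => (dd.1, se.2))) with
  | none => []   -- exception escaped (outside Pre_)
  | some segpairs =>
    -- [g[0][1] for g in _runs(pairs)]   (every run is nonempty, so g[0] = headD)
    (runsB ((car_direction, car_loc) :: segpairs)).map (fun g => (g.headD ("", (0, 0))).2)

-- ===== PRECONDITION & SPEC =====
-- Pre_ excludes exactly the inputs on which Python A raises: some consecutive pair of points
-- (starting from car_loc) is equal or differs in both coordinates.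
def Pre_refine_path (path : List (Int × Int)) (car_loc : Int × Int) (car_direction : String) : Prop :=
  List.IsChain (fun s e => (s.1 = e.1 ∧ s.2 ≠ e.2) ∨ (s.2 = e.2 ∧ s.1 ≠ e.1)) (car_loc :: path)
instance (path : List (Int × Int)) (car_loc : Int × Int) (car_direction : String) : Decidable (Pre_refine_path path car_loc car_direction) := by unfold Pre_refine_path; infer_instance

def pvWitness_refine_path : (List (Int × Int)) × (Int × Int) × String :=
  ([(0, 2), (3, 2), (3, 1)], (0, 0), "N")

def Spec_refine_path (path : List (Int × Int)) (car_loc : Int × Int) (car_direction : String) (out : List (Int × Int)) : Prop := out = refine_path_alt path car_loc car_direction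
instance (path : List (Int × Int)) (car_loc : Int × Int) (car_direction : String) (out : List (Int × Int)) : Decidable (Spec_refine_path path car_loc car_direction out) := by unfold Spec_refine_path; infer_instance

-- ===== CLAIM =====
def Claim_equal_refine_path : Prop := ∀ (path : List (Int × Int)) (car_loc : Int × Int) (car_direction : String), Dom_refine_path path car_loc car_direction → Pre_refine_path path car_loc car_direction → Spec_refine_path path car_loc car_direction (refine_path path car_loc car_direction)

-- ===== LEMMAS AND PROOFS =====

-- directions of the consecutive segments, computed left to right (`none` = first bad pair)
def mdirs : (Int × Int) → List (Int × Int) → Option (List String)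
  | _, [] => some []
  | cur, p :: ps =>
    match gdd cur p with
    | none => none
    | some (d, _) => (mdirs p ps).map (d :: ·)

-- B's mapM over the zipped pairs is mdirs zipped with the path points
lemma zip_mapM_eq_mdirs (path : List (Int × Int)) : ∀ cur : Int × Int,
    (List.zip (cur :: path) path).mapM (fun se => (gdd se.1 se.2).map (fun dd => (dd.1, se.2)))
      = (mdirs cur path).map (fun ds => ds.zip path) := by
  induction path with
  | nil => intro cur; simp [mdirs]
  | cons p ps ih =>
    intro cur
    simp only [List.zip_cons_cons, List.mapM_cons, mdirs]
    cases h : gdd cur p with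
    | none => simp [Option.map, Option.bind]
    | some dd =>
      obtain ⟨d, dist⟩ := dd
      simp only [Option.map_some]
      rw [show (List.zip (p :: ps) ps) = ((p :: ps).zip ps) from rfl, ih p]
      cases mdirs p ps <;> simp [Option.bind]

-- the selected endpoints: keep p when its direction differs from the previous one
def sel : String → List String → List (Int × Int) → List (Int × Int)
  | _, [], _ => []
  | _, _ :: _, [] => []
  | cd, d :: ds, p :: ps => (if d ≠ cd then [p] else []) ++ sel d ds ps

-- A's loop returns the accumulator followed by the selected endpoints
lemma refineA_loop_eq : ∀ (path ret : List (Int × Int)) (cur : Int × Int) (cd : String),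
    refineA_loop path ret cur cd = (mdirs cur path).map (fun ds => ret ++ sel cd ds path) := by
  intro path
  induction path with
  | nil => intro ret cur cd; simp [refineA_loop, mdirs, sel]
  | cons p ps ih =>
    intro ret cur cd
    simp only [refineA_loop, mdirs]
    cases h : gdd cur p with
    | none => simp
    | some dd =>
      obtain ⟨d, dist⟩ := dd
      by_cases hd : d = cd
      · subst hd
        simp only [beq_self_eq_true, if_true, ih]
        cases mdirs p ps <;> simp [sel]
      · have : (d == cd) = false := by simp [hd]
        simp only [this, Bool.false_eq_true, if_false, ih]
        cases mdirs p ps <;> simp [sel, hd]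

-- equation lemmas for the well-founded recursion runsB
@[simp] lemma runsB_nil : runsB [] = [] := by rw [runsB.eq_def]
lemma runsB_cons (d : String) (p : Int × Int) (rest : List (String × (Int × Int))) :
    runsB ((d, p) :: rest) =
      ((d, p) :: rest.takeWhile (fun x => x.1 == d)) :: runsB (rest.dropWhile (fun x => x.1 == d)) := by
  rw [runsB.eq_def]

-- "keep where the key differs from the previous key", the first-of-each-run view of runsB
def go : String → List (String × (Int × Int)) → List (Int × Int)
  | _, [] => []
  | cd, (d, p) :: rest => (if d ≠ cd then [p] else []) ++ go d rest

lemma runsB_dropWhile_eq_go : ∀ (rest : List (String × (Int × Int))) (cd : String),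
    (runsB (rest.dropWhile (fun x => x.1 == cd))).map (fun g => (g.headD ("", (0, 0))).2)
      = go cd rest := by
  intro rest
  induction rest with
  | nil => intro cd; simp [go]
  | cons x r ih =>
    intro cd
    obtain ⟨d, p⟩ := x
    by_cases hd : d = cd
    · subst hd
      simp only [List.dropWhile_cons, beq_self_eq_true, if_true, go, ne_eq, not_true_eq_false,
        if_false, List.nil_append, ih]
    · have hb : (d == cd) = false := by simp [hd]
      simp only [List.dropWhile_cons, hb, Bool.false_eq_true, if_false, runsB_cons,
        List.map_cons, List.headD_cons, ih d, go, ne_eq, hd, not_false_eq_true, if_true]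
      simp

lemma runsB_cons_eq (cd : String) (l : Int × Int) (L : List (String × (Int × Int))) :
    (runsB ((cd, l) :: L)).map (fun g => (g.headD ("", (0, 0))).2) = l :: go cd L := by
  rw [runsB_cons, List.map_cons, runsB_dropWhile_eq_go L cd]
  simp

-- go on a zipped direction/point list is sel
lemma go_zip_eq_sel : ∀ (ds : List String) (path : List (Int × Int)) (cd : String),
    go cd (ds.zip path) = sel cd ds path := by
  intro ds
  induction ds with
  | nil => intro path cd; simp [go, sel]
  | cons d ds ih =>
    intro path cd
    cases path with
    | nil => simp [go, sel]
    | cons p ps => simp only [List.zip_cons_cons, go, sel, ih]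

-- the two ports agree on every input (both return [] where the Python raises)
lemma ports_eq (path : List (Int × Int)) (car_loc : Int × Int) (car_direction : String) :
    refine_path path car_loc car_direction = refine_path_alt path car_loc car_direction := by
  unfold refine_path refine_path_alt
  rw [zip_mapM_eq_mdirs path car_loc, refineA_loop_eq path [car_loc] car_loc car_direction]
  cases mdirs car_loc path with
  | none => simp
  | some ds =>
    simp only [Option.map_some, Option.getD_some]
    rw [runsB_cons_eq car_direction car_loc (ds.zip path), go_zip_eq_sel ds path car_direction]
    simp

-- ===== VERDICT =====
theorem refine_path_spec : Claim_equal_refine_path := by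
  intro path car_loc car_direction _ _
  unfold Spec_refine_path
  exact ports_eq path car_loc car_direction
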